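-- pv_equiv track=rewrite | github.com/adibMosharrof/ProAssist | custom/src/dst_data_builder/training_modules/frame_integration.py | _calculate_overall_frame_range
-- ===== SOURCE A (Python) =====
-- from typing import Dict, Any, List, Optional, Tuple
--
-- def _calculate_overall_frame_range(
--     conversation: List[Dict[str, Any]]
-- ) -> Tuple[int, int]:
--     """
--     Calculate overall frame range for the entire conversation
--
--     Args:
--         conversation: List of conversation turns
--
--     Returns:
--         Tuple of (start_frame, end_frame)
--     """
--     start_frames = []
--     end_frames = []
--
--     for turn in conversation:
--         start_frame = turn.get("start_frame", 0)
--         end_frame = turn.get("end_frame", 0)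
--         start_frames.append(start_frame)
--         end_frames.append(end_frame)
--
--     if not start_frames:
--         return 0, 0
--
--     return min(start_frames), max(end_frames)
-- ===== SOURCE B (Python) =====
-- def _calculate_overall_frame_range(conversation):
--     if not conversation:
--         return 0, 0
--     it = iter(conversation)
--     first = next(it)
--     mn = first.get("start_frame", 0)
--     mx = first.get("end_frame", 0)
--     for turn in it:
--         s = turn.get("start_frame", 0)
--         if s < mn:
--             mn = s
--         e = turn.get("end_frame", 0)
--         if e > mx:
--             mx = e
--     return mn, mx
-- ===== Notes on version B (the rewrite author's own statement) =====
-- stated objective: alternative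
-- what changed: Single pass keeping running min/max initialized from the first turn, instead of materializing two lists and calling min()/max() on them.
import Mathlib
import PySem

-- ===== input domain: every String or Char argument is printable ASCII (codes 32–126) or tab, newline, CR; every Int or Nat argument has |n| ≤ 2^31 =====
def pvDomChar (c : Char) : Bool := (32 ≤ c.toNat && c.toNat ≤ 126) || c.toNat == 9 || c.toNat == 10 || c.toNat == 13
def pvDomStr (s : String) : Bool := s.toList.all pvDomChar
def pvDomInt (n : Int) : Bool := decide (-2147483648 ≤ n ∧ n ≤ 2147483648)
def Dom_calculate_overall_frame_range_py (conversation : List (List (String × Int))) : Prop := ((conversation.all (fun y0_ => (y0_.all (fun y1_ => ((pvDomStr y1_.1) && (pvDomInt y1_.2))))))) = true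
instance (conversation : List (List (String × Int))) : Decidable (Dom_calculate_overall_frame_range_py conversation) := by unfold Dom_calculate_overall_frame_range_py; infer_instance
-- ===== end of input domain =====

-- B replaces the two-list build plus min()/max() with a single pass carrying running min/max; objective: alternative decomposition (no speed claim).

-- ===== PORT A =====
-- turn.get(k, 0) on a dict given as an association list: first match, default 0 (exact for the dict convention)
def pvTurnGet (turn : List (String × Int)) (k : String) : Int :=
  ((turn.find? (fun p => p.1 == k)).map Prod.snd).getD 0

def calculate_overall_frame_range_py (conversation : List (List (String × Int))) : Int × Int :=
  -- the for-loop appending start_frame/end_frame to the two lists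
  let acc := conversation.foldl
    (fun (acc : List Int × List Int) turn =>
      (acc.1 ++ [pvTurnGet turn "start_frame"], acc.2 ++ [pvTurnGet turn "end_frame"]))
    ([], [])
  if acc.1 = [] then (0, 0)
  else (((PySem.List.min? acc.1 (fun x => x)).getD 0), ((PySem.List.max? acc.2 (fun x => x)).getD 0))

-- ===== PORT B =====
def pvRangeLoop (mn mx : Int) : List (List (String × Int)) → Int × Int
  | [] => (mn, mx)
  | t :: ts =>
      let s := pvTurnGet t "start_frame"
      let mn' := if s < mn then s else mn
      let e := pvTurnGet t "end_frame"
      let mx' := if e > mx then e else mx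
      pvRangeLoop mn' mx' ts

def calculate_overall_frame_range_py_alt (conversation : List (List (String × Int))) : Int × Int :=
  match conversation with
  | [] => (0, 0)
  | first :: rest => pvRangeLoop (pvTurnGet first "start_frame") (pvTurnGet first "end_frame") rest

-- ===== PRECONDITION & SPEC =====
def Spec_calculate_overall_frame_range_py (conversation : List (List (String × Int))) (out : Int × Int) : Prop := out = calculate_overall_frame_range_py_alt conversation
instance (conversation : List (List (String × Int))) (out : Int × Int) : Decidable (Spec_calculate_overall_frame_range_py conversation out) := by unfold Spec_calculate_overall_frame_range_py; infer_instance

-- ===== CLAIM (what is proved, stated in full; the proofs are below) =====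
def Claim_equal_calculate_overall_frame_range_py : Prop := ∀ (conversation : List (List (String × Int))), Dom_calculate_overall_frame_range_py conversation → Spec_calculate_overall_frame_range_py conversation (calculate_overall_frame_range_py conversation)

-- ===== LEMMAS AND PROOFS =====

lemma pvRangeLoop_eq (ts : List (List (String × Int))) : ∀ mn mx,
    pvRangeLoop mn mx ts =
      ((ts.map (fun t => pvTurnGet t "start_frame")).foldl min mn,
       (ts.map (fun t => pvTurnGet t "end_frame")).foldl max mx) := by
  induction ts with
  | nil => intro mn mx; simp [pvRangeLoop]
  | cons t ts ih =>
      intro mn mx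
      simp only [pvRangeLoop, List.map_cons, List.foldl_cons, ih]
      congr 1
      · congr 1; rw [min_def]; split_ifs <;> omega
      · congr 1; rw [max_def]; split_ifs <;> omega

lemma pvFold_pair (xs : List (List (String × Int))) : ∀ l1 l2 : List Int,
    xs.foldl (fun (acc : List Int × List Int) turn =>
        (acc.1 ++ [pvTurnGet turn "start_frame"], acc.2 ++ [pvTurnGet turn "end_frame"])) (l1, l2)
      = (l1 ++ xs.map (fun t => pvTurnGet t "start_frame"),
         l2 ++ xs.map (fun t => pvTurnGet t "end_frame")) := by
  induction xs with
  | nil => intro l1 l2; simp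
  | cons x xs ih => intro l1 l2; simp [ih]

-- ===== VERDICT (by name: the statement is the Claim_ definition above) =====
theorem calculate_overall_frame_range_py_spec : Claim_equal_calculate_overall_frame_range_py := by
  intro conversation _
  show calculate_overall_frame_range_py conversation = calculate_overall_frame_range_py_alt conversation
  cases conversation with
  | nil => rfl
  | cons first rest =>
      unfold calculate_overall_frame_range_py calculate_overall_frame_range_py_alt
      rw [pvFold_pair]
      simp only [List.nil_append, List.map_cons]
      rw [if_neg (by simp)]
      rw [PySem.List.min?_id_cons, PySem.List.max?_id_cons, pvRangeLoop_eq]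
      rfl
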